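-- pv_equiv track=rewrite | github.com/senkik/Kenya-health-access | backend/location/service.py | detect_operator
-- ===== SOURCE A (Python) =====
-- def detect_operator(phone_number):
--     """Detect mobile operator from phone number prefix"""
--     prefixes = {
--         'safaricom': ['0710', '0711', '0712', '0713', '0714', '0715', '0716', '0717', '0718', '0719',
--                      '0720', '0721', '0722', '0723', '0724', '0725', '0726', '0727', '0728', '0729',
--                      '0740', '0741', '0742', '0743', '0745', '0746', '0748', '0757', '0758', '0768',
--                      '0790', '0791', '0792', '0793', '0794', '0795', '0796', '0797', '0798', '0799'],
--         'airtel': ['0730', '0731', '0732', '0733', '0734', '0735', '0736', '0737', '0738', '0739',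
--                   '0750', '0751', '0752', '0753', '0754', '0755', '0756', '0759', '0760', '0761',
--                   '0762', '0763', '0764', '0765', '0766', '0767', '0769', '0770', '0771', '0772'],
--         'telkom': ['0773', '0774', '0775', '0776', '0777', '0778', '0779', '0780', '0781', '0782',
--                   '0783', '0784', '0785', '0786', '0787', '0788', '0789']
--     }
--
--     # Normalize phone number to local format (remove +254, add 0)
--     if phone_number.startswith('+254'):
--         phone_number = '0' + phone_number[4:]
--
--     for operator, prefixes_list in prefixes.items():
--         for prefix in prefixes_list:
--             if phone_number.startswith(prefix):
--                 return operator
--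
--     return 'unknown'
-- ===== SOURCE B (Python) =====
-- # B: arithmetic classification -- decode the two digits after '07' and classify by numeric ranges
-- # instead of scanning 87 prefix strings; same '+254' normalization.
--
-- def detect_operator(phone_number):
--     """Detect mobile operator from phone number prefix"""
--     if phone_number.startswith('+254'):
--         phone_number = '0' + phone_number[4:]
--     p = phone_number[:4]
--     if len(p) == 4 and p[0] == '0' and p[1] == '7' and p[2].isdigit() and p[3].isdigit():
--         n = (ord(p[2]) - 48) * 10 + (ord(p[3]) - 48)
--         if 10 <= n <= 29 or n in (40, 41, 42, 43, 45, 46, 48, 57, 58, 68) or 90 <= n <= 99: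
--             return 'safaricom'
--         if 30 <= n <= 39 or 50 <= n <= 56 or n == 59 or 60 <= n <= 67 or n == 69 or 70 <= n <= 72:
--             return 'airtel'
--         if 73 <= n <= 89:
--             return 'telkom'
--     return 'unknown'
-- ===== Notes on version B (the rewrite author's own statement) =====
-- stated objective: alternative
-- what changed: Replaces A's nested scan over three literal lists of 87 four-char prefixes with an arithmetic classification: after the same '+254' normalization, B checks the number starts '07' followed by two digits, decodes those two digits to a number n, and picks the operator by numeric range tests on n (the ranges exactly cover A's prefix lists).
import Mathlib
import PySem

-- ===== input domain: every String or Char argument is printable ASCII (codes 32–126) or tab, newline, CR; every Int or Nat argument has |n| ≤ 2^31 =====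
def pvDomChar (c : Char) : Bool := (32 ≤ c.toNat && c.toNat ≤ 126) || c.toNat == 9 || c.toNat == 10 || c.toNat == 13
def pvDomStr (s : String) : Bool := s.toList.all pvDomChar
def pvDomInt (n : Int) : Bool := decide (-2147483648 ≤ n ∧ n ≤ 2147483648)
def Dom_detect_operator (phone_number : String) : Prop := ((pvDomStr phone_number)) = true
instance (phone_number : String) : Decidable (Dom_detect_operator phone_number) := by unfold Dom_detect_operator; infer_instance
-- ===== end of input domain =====

-- B replaces A's scan over 87 literal prefixes by an arithmetic classification: after the same
-- '+254' normalization it decodes the two digits following '07' and classifies by numeric ranges.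

-- ===== PORT A =====
def pvPrefixesA : List (String × List (List Char)) := [
  ("safaricom", [['0', '7', '1', '0'],
    ['0', '7', '1', '1'],
    ['0', '7', '1', '2'],
    ['0', '7', '1', '3'],
    ['0', '7', '1', '4'],
    ['0', '7', '1', '5'],
    ['0', '7', '1', '6'],
    ['0', '7', '1', '7'],
    ['0', '7', '1', '8'],
    ['0', '7', '1', '9'],
    ['0', '7', '2', '0'],
    ['0', '7', '2', '1'],
    ['0', '7', '2', '2'],
    ['0', '7', '2', '3'],
    ['0', '7', '2', '4'],
    ['0', '7', '2', '5'],
    ['0', '7', '2', '6'],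
    ['0', '7', '2', '7'],
    ['0', '7', '2', '8'],
    ['0', '7', '2', '9'],
    ['0', '7', '4', '0'],
    ['0', '7', '4', '1'],
    ['0', '7', '4', '2'],
    ['0', '7', '4', '3'],
    ['0', '7', '4', '5'],
    ['0', '7', '4', '6'],
    ['0', '7', '4', '8'],
    ['0', '7', '5', '7'],
    ['0', '7', '5', '8'],
    ['0', '7', '6', '8'],
    ['0', '7', '9', '0'],
    ['0', '7', '9', '1'],
    ['0', '7', '9', '2'],
    ['0', '7', '9', '3'],
    ['0', '7', '9', '4'],
    ['0', '7', '9', '5'],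
    ['0', '7', '9', '6'],
    ['0', '7', '9', '7'],
    ['0', '7', '9', '8'],
    ['0', '7', '9', '9']]),
  ("airtel", [['0', '7', '3', '0'],
    ['0', '7', '3', '1'],
    ['0', '7', '3', '2'],
    ['0', '7', '3', '3'],
    ['0', '7', '3', '4'],
    ['0', '7', '3', '5'],
    ['0', '7', '3', '6'],
    ['0', '7', '3', '7'],
    ['0', '7', '3', '8'],
    ['0', '7', '3', '9'],
    ['0', '7', '5', '0'],
    ['0', '7', '5', '1'],
    ['0', '7', '5', '2'],
    ['0', '7', '5', '3'],
    ['0', '7', '5', '4'],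
    ['0', '7', '5', '5'],
    ['0', '7', '5', '6'],
    ['0', '7', '5', '9'],
    ['0', '7', '6', '0'],
    ['0', '7', '6', '1'],
    ['0', '7', '6', '2'],
    ['0', '7', '6', '3'],
    ['0', '7', '6', '4'],
    ['0', '7', '6', '5'],
    ['0', '7', '6', '6'],
    ['0', '7', '6', '7'],
    ['0', '7', '6', '9'],
    ['0', '7', '7', '0'],
    ['0', '7', '7', '1'],
    ['0', '7', '7', '2']]),
  ("telkom", [['0', '7', '7', '3'],
    ['0', '7', '7', '4'],
    ['0', '7', '7', '5'],
    ['0', '7', '7', '6'],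
    ['0', '7', '7', '7'],
    ['0', '7', '7', '8'],
    ['0', '7', '7', '9'],
    ['0', '7', '8', '0'],
    ['0', '7', '8', '1'],
    ['0', '7', '8', '2'],
    ['0', '7', '8', '3'],
    ['0', '7', '8', '4'],
    ['0', '7', '8', '5'],
    ['0', '7', '8', '6'],
    ['0', '7', '8', '7'],
    ['0', '7', '8', '8'],
    ['0', '7', '8', '9']])]

-- inner 'for prefix in prefixes_list: if startswith: return operator'
def pvScanInner (pn : List Char) (op : String) : List (List Char) → Option String
  | [] => none
  | p :: rest => if PySem.Chars.startswith pn p then some op else pvScanInner pn op rest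

-- outer 'for operator, prefixes_list in prefixes.items()'
def pvScanOuter (pn : List Char) : List (String × List (List Char)) → String
  | [] => "unknown"
  | (op, ps) :: rest =>
      match pvScanInner pn op ps with
      | some r => r
      | none => pvScanOuter pn rest

def detect_operator (phone_number : String) : String :=
  let s := phone_number.toList
  let pn := if PySem.Chars.startswith s ['+', '2', '5', '4']
            then '0' :: PySem.Chars.slice s (some 4) none else s
  pvScanOuter pn pvPrefixesA

-- ===== PORT B =====
-- classification of the two-digit number n after '07' (Source B's chained ifs)
def pvClassify (n : Nat) : String :=
  if (10 ≤ n ∧ n ≤ 29) ∨ n ∈ [40, 41, 42, 43, 45, 46, 48, 57, 58, 68] ∨ (90 ≤ n ∧ n ≤ 99)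
    then "safaricom"
  else if (30 ≤ n ∧ n ≤ 39) ∨ (50 ≤ n ∧ n ≤ 56) ∨ n = 59 ∨ (60 ≤ n ∧ n ≤ 67) ∨ n = 69 ∨ (70 ≤ n ∧ n ≤ 72)
    then "airtel"
  else if 73 ≤ n ∧ n ≤ 89 then "telkom"
  else "unknown"

def detect_operator_alt (phone_number : String) : String :=
  let s := phone_number.toList
  let pn := if PySem.Chars.startswith s ['+', '2', '5', '4']
            then '0' :: PySem.Chars.slice s (some 4) none else s
  match PySem.Chars.slice pn none (some 4) with
  | [a, b, c2, c3] =>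
      if a = '0' ∧ b = '7' ∧ c2.isDigit ∧ c3.isDigit then
        pvClassify ((c2.toNat - 48) * 10 + (c3.toNat - 48))
      else "unknown"
  | _ => "unknown"

-- ===== PRECONDITION & SPEC =====
def Spec_detect_operator (phone_number : String) (out : String) : Prop := out = detect_operator_alt phone_number
instance (phone_number : String) (out : String) : Decidable (Spec_detect_operator phone_number out) := by unfold Spec_detect_operator; infer_instance

-- ===== CLAIM (what is proved, stated in full; the proofs are below) =====
def Claim_equal_detect_operator : Prop := ∀ (phone_number : String), Dom_detect_operator phone_number → Spec_detect_operator phone_number (detect_operator phone_number)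

-- ===== LEMMAS AND PROOFS =====

def pvFlatten (l : List (String × List (List Char))) : List (List Char × String) :=
  l.flatMap (fun e => e.2.map (fun p => (p, e.1)))

-- shape of every key in A's tables: ['0','7',digit,digit]
def pvShape : List Char → Bool
  | [a, b, c, d] => a == '0' && b == '7' && c.isDigit && d.isDigit
  | _ => false

lemma pvStartswith_eq_take (pn p : List Char) (hp : p.length = 4) :
    PySem.Chars.startswith pn p = (p == pn.take 4) := by
  rw [Bool.eq_iff_iff]
  simp [PySem.Chars.startswith_iff, List.prefix_iff_eq_take, hp]

lemma pvInner_eq (pn : List Char) (op : String) (ps : List (List Char)) (tail : List (List Char × String))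
    (h : ∀ p ∈ ps, p.length = 4) :
    (match pvScanInner pn op ps with
     | some r => r
     | none => (PySem.Dict.mk tail).getD (pn.take 4) "unknown")
    = (PySem.Dict.mk (ps.map (fun p => (p, op)) ++ tail)).getD (pn.take 4) "unknown" := by
  induction ps with
  | nil => simp [pvScanInner]
  | cons p rest ih =>
    have hp : p.length = 4 := h p (by simp)
    simp only [pvScanInner, pvStartswith_eq_take pn p hp, List.map_cons, List.cons_append]
    by_cases hb : p = pn.take 4
    · simp [hb, PySem.Dict.getD_eq_get?_getD, PySem.Dict.get?_mk_cons]
    · have hb' : (p == pn.take 4) = false := by simp [hb]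
      rw [hb']
      simp only [Bool.false_eq_true, if_false]
      rw [ih (fun q hq => h q (List.mem_cons_of_mem _ hq))]
      simp [PySem.Dict.getD_eq_get?_getD, PySem.Dict.get?_mk_cons, hb]

lemma pvOuter_eq (pn : List Char) (l : List (String × List (List Char)))
    (h : ∀ e ∈ l, ∀ p ∈ e.2, p.length = 4) :
    pvScanOuter pn l = (PySem.Dict.mk (pvFlatten l)).getD (pn.take 4) "unknown" := by
  induction l with
  | nil => rfl
  | cons e rest ih =>
    obtain ⟨op, ps⟩ := e
    rw [pvScanOuter, ih (fun e he => h e (List.mem_cons_of_mem _ he))]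
    rw [pvInner_eq pn op ps (pvFlatten rest) (h (op, ps) (by simp))]
    rfl

-- a key not of the table shape is absent from any table whose keys all have the shape
lemma pvGetD_unknown (k : List Char) (l : List (List Char × String))
    (hl : ∀ p ∈ l, pvShape p.1 = true) (hk : pvShape k = false) :
    (PySem.Dict.mk l).getD k "unknown" = "unknown" := by
  induction l with
  | nil => rfl
  | cons p rest ih =>
    have hne : (p.1 == k) = false := by
      cases hbe : p.1 == k
      · rfl
      · exact absurd (eq_of_beq hbe ▸ hl p (by simp)) (by simp [hk])
    rw [PySem.Dict.getD_eq_get?_getD, PySem.Dict.get?_mk_cons, hne]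
    simpa [PySem.Dict.getD_eq_get?_getD] using ih (fun q hq => hl q (List.mem_cons_of_mem _ hq))

lemma pvDigit_cases (c : Char) (h : c.isDigit = true) :
    c = '0' ∨ c = '1' ∨ c = '2' ∨ c = '3' ∨ c = '4' ∨ c = '5' ∨ c = '6' ∨ c = '7' ∨ c = '8' ∨ c = '9' := by
  have hofs : Char.ofNat c.toNat = c := Char.ofNat_toNat c
  have hb : 48 ≤ c.toNat ∧ c.toNat ≤ 57 := by
    simp only [Char.isDigit, Bool.and_eq_true, decide_eq_true_iff] at h
    exact ⟨h.1, h.2⟩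
  have h10 : c.toNat = 48 ∨ c.toNat = 49 ∨ c.toNat = 50 ∨ c.toNat = 51 ∨ c.toNat = 52 ∨
      c.toNat = 53 ∨ c.toNat = 54 ∨ c.toNat = 55 ∨ c.toNat = 56 ∨ c.toNat = 57 := by omega
  rcases h10 with h48 | h48 | h48 | h48 | h48 | h48 | h48 | h48 | h48 | h48 <;>
    rw [h48] at hofs <;> subst hofs <;> decide

lemma pvAgree (c2 c3 : Char) (h2 : c2.isDigit = true) (h3 : c3.isDigit = true) :
    (PySem.Dict.mk (pvFlatten pvPrefixesA)).getD ['0', '7', c2, c3] "unknown"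
      = pvClassify ((c2.toNat - 48) * 10 + (c3.toNat - 48)) := by
  rcases pvDigit_cases c2 h2 with h | h | h | h | h | h | h | h | h | h <;> subst h <;>
    rcases pvDigit_cases c3 h3 with h | h | h | h | h | h | h | h | h | h <;> subst h <;> decide

lemma pvCore (pn : List Char) :
    pvScanOuter pn pvPrefixesA
      = (match PySem.Chars.slice pn none (some 4) with
         | [a, b, c2, c3] =>
             if a = '0' ∧ b = '7' ∧ c2.isDigit ∧ c3.isDigit then
               pvClassify ((c2.toNat - 48) * 10 + (c3.toNat - 48))
             else "unknown"
         | _ => "unknown") := by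
  rw [PySem.Chars.slice_eq_listSlice, PySem.List.slice_to _ (by norm_num)]
  rw [pvOuter_eq pn pvPrefixesA (by decide)]
  by_cases hS : pvShape (pn.take 4) = true
  · match hk : pn.take 4 with
    | [a, b, c2, c3] =>
      rw [hk] at hS
      simp only [pvShape, Bool.and_eq_true, beq_iff_eq] at hS
      obtain ⟨⟨⟨ha, hb⟩, h2⟩, h3⟩ := hS
      subst ha; subst hb
      rw [pvAgree c2 c3 h2 h3]
      simp [h2, h3]
    | [] => rw [hk] at hS; simp [pvShape] at hS
    | [a] => rw [hk] at hS; simp [pvShape] at hS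
    | [a, b] => rw [hk] at hS; simp [pvShape] at hS
    | [a, b, c] => rw [hk] at hS; simp [pvShape] at hS
    | a :: b :: c :: d :: e :: rest =>
      exact absurd hk (by have := List.length_take_le 4 pn; intro hc; rw [hc] at this; simp at this; omega)
  · rw [pvGetD_unknown _ _ (by decide) (by simpa using hS)]
    match hk : pn.take 4 with
    | [a, b, c2, c3] =>
      rw [hk] at hS
      by_cases hcond : a = '0' ∧ b = '7' ∧ c2.isDigit = true ∧ c3.isDigit = true
      · obtain ⟨ha, hb, h2, h3⟩ := hcond
        exact absurd (by simp [pvShape, ha, hb, h2, h3]) hS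
      · simp [hcond]
    | [] => rfl
    | [a] => rfl
    | [a, b] => rfl
    | [a, b, c] => rfl
    | a :: b :: c :: d :: e :: rest =>
      exact absurd hk (by have := List.length_take_le 4 pn; intro hc; rw [hc] at this; simp at this; omega)

-- ===== VERDICT (by name: the statement is the Claim_ definition above) =====
theorem detect_operator_spec : Claim_equal_detect_operator := by
  intro s _
  unfold Spec_detect_operator detect_operator detect_operator_alt
  exact pvCore _
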